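-- pv_equiv track=rewrite | github.com/livingbio/typed-ffmpeg | scripts/parse_c/parse_av_option.py | _aligns
-- ===== SOURCE A (Python) =====
-- def _p(string: str, assert_key: str = None) -> str:
--     if not "=" in string or not string.startswith("."):
--         return string
--
--     key, value = string.split("=", 1)
--     key = key.strip()[1:]
--     if assert_key:
--         assert assert_key == key.strip(), string
--
--     return string
--
-- def _aligns(values: list[str]) -> dict[str, str]:
--     vars = ["name", "help", "offset", "type", "default", "min", "max", "flags", "unit"]
--     output = {}
--
--     assert len(values) <= len(vars), values
--     j = 0
--
--     for i, var in enumerate(vars):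
--         if j < len(values):
--             try:
--                 v = _p(values[j], var)
--                 output[var] = v
--                 j += 1
--             except AssertionError:
--                 output[var] = None
--         else:
--             output[var] = None
--
--     assert j == len(values), values
--     return output
-- ===== SOURCE B (Python) =====
-- def _aligns(values: list[str]) -> dict[str, str]:
--     fields = ["name", "help", "offset", "type", "default", "min", "max", "flags", "unit"]
--     assert len(values) <= len(fields), values
--     output = {field: None for field in fields}
--     i = 0
--     for value in values:
--         if value.startswith(".") and "=" in value:
--             key = value.split("=", 1)[0].strip()[1:].strip()
--             while i < len(fields) and fields[i] != key:
--                 i += 1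
--         assert i < len(fields), values
--         output[fields[i]] = value
--         i += 1
--     return output
-- ===== Notes on version B (the rewrite author's own statement) =====
-- stated objective: alternative
-- what changed: A loops over the 9 fixed field names, pulling values via a j-cursor and re-parsing each value inside a try/except per field; B parses each value's embedded key once, pre-fills the output with all fields mapped to None, and loops over the values driving an index into the field list forward to the matching field.
import Mathlib
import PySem

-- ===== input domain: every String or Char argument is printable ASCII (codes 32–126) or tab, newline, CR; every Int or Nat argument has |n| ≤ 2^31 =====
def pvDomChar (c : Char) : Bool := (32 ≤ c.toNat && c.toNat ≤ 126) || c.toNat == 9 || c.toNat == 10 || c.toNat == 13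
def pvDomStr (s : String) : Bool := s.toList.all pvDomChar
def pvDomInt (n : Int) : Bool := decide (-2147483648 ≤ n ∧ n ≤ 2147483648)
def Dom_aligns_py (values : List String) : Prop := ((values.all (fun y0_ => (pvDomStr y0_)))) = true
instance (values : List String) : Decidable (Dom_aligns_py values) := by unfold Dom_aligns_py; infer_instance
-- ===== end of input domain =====

-- B re-implements _aligns by looping over the values with a forward index into the fixed
-- field list (output pre-filled with None), instead of A's loop over the fields with a
-- value cursor and per-field try/except re-parse; equal return value on Pre_ (reviewers:
-- both Pythons raise AssertionError outside Pre_, which Pre_ excludes).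

-- the fixed field-name list both Pythons hard-code
def pvVars : List String := ["name", "help", "offset", "type", "default", "min", "max", "flags", "unit"]

-- ===== PORT A =====
-- _p: returns `some string` on normal return, `none` where the Python assert raises
def pHelper (string : String) (assert_key : Option String) : Option String :=
  if ¬ PySem.Str.isIn "=" string ∨ ¬ PySem.Str.startswith string "." then some string
  else
    let key0 := ((PySem.Str.splitMax? string "=" 1).getD []).getD 0 ""
    let key := PySem.Str.slice (PySem.Str.strip key0) (some 1) none
    match assert_key with
    | some ak =>
        if ak ≠ "" then (if ak = PySem.Str.strip key then some string else none) else some string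
    | none => some string

-- the body of A's `for i, var in enumerate(vars)` loop; state = (output, j)
def pvAStep (values : List String) (acc : PySem.Dict String (Option String) × Nat)
    (p : Int × String) : PySem.Dict String (Option String) × Nat :=
  let var := p.2
  if h : acc.2 < values.length then
    match pHelper values[acc.2] (some var) with
    | some v => (acc.1.insert var (some v), acc.2 + 1)
    | none => (acc.1.insert var none, acc.2)
  else (acc.1.insert var none, acc.2)

-- the two top-level asserts raise outside Pre_; the port returns the computed dict there
def aligns_py (values : List String) : List (String × Option String) :=
  ((PySem.List.enumerate pvVars 0).foldl (pvAStep values) (PySem.Dict.empty, 0)).1.items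

-- ===== PORT B =====
-- the embedded key of a value, parsed once: value.split("=",1)[0].strip()[1:].strip()
def keyOf (value : String) : Option String :=
  if PySem.Str.startswith value "." ∧ PySem.Str.isIn "=" value then
    some (PySem.Str.strip (PySem.Str.slice
      (PySem.Str.strip (((PySem.Str.splitMax? value "=" 1).getD []).getD 0 "")) (some 1) none))
  else none

-- B's `while i < len(vars) and vars[i] != key: i += 1`
def advanceB (k : String) (i : Nat) : Nat :=
  if h : i < pvVars.length then (if pvVars[i] ≠ k then advanceB k (i + 1) else i) else i
termination_by pvVars.length - i

-- B's `for value in values` loop; B's assert raises outside Pre_, the port stops there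
def bLoop : List String → Nat → PySem.Dict String (Option String) → PySem.Dict String (Option String)
  | [], _, d => d
  | v :: vs, i, d =>
    let i' := match keyOf v with | some k => advanceB k i | none => i
    if h : i' < pvVars.length then bLoop vs (i' + 1) (d.insert pvVars[i'] (some v)) else d

def aligns_py_alt (values : List String) : List (String × Option String) :=
  (bLoop values 0 (pvVars.foldl (fun d var => d.insert var none) PySem.Dict.empty)).items

-- ===== PRECONDITION & SPEC =====
-- Pre_: exactly the inputs where the Python A returns (both Pythons raise AssertionError
-- elsewhere): the values fit an increasing schedule into the 9 fields, each value whose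
-- embedded key is some k sitting at a field named k.
def Pre_aligns_py (values : List String) : Prop :=
  ((List.range pvVars.length).sublists.any (fun s =>
    s.length = values.length &&
    (values.zip s).all (fun p =>
      match keyOf p.1 with
      | none => true
      | some k => pvVars[p.2]? == some k))) = true

instance (values : List String) : Decidable (Pre_aligns_py values) := by
  unfold Pre_aligns_py; infer_instance

def pvWitness_aligns_py : List String := [".name=foo", "7", ".type = INT"]

def Spec_aligns_py (values : List String) (out : List (String × Option String)) : Prop := out = aligns_py_alt values
instance (values : List String) (out : List (String × Option String)) : Decidable (Spec_aligns_py values out) := by unfold Spec_aligns_py; infer_instance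

-- ===== CLAIM (what is proved, stated in full; the proofs are below) =====
def Claim_equal_aligns_py : Prop := ∀ (values : List String), Dom_aligns_py values → Pre_aligns_py values → Spec_aligns_py values (aligns_py values)

-- ===== LEMMAS AND PROOFS =====

-- the still-None tail of B's pre-filled output, from field index i on
def pvPad (i : Nat) : List (String × Option String) :=
  (pvVars.drop i).map (fun w => (w, none))

theorem pvVars_nodup : pvVars.Nodup := by decide

theorem pvVars_ne_empty : ∀ w ∈ pvVars, w ≠ "" := by decide

-- _p's accept/reject decision, phrased through B's one-shot key parse
theorem pHelper_eq (v w : String) (hw : w ≠ "") :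
    pHelper v (some w) =
      match keyOf v with
      | none => some v
      | some k => if w = k then some v else none := by
  unfold pHelper keyOf
  by_cases hs : PySem.Chars.startswith v.toList ['.'] = true <;>
    by_cases hin : PySem.Chars.isIn ['='] v.toList = true <;>
      simp [hs, hin, hw]

-- past the end of the field list, B's while-loop stays put
theorem advanceB_ge (k : String) (i : Nat) (h : pvVars.length ≤ i) : advanceB k i = i := by
  unfold advanceB
  simp [Nat.not_lt.mpr h]

-- past the end of the field list, B's loop raises (the port returns the dict)
theorem bLoop_ge (vs : List String) (i : Nat) (d : PySem.Dict String (Option String))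
    (h : pvVars.length ≤ i) : bLoop vs i d = d := by
  cases vs with
  | nil => rfl
  | cons v vs =>
    unfold bLoop
    cases keyOf v <;>
      simp [advanceB_ge _ _ h, Nat.not_lt.mpr h]

-- a keyed value that does not match the current field: B just advances the field index
theorem bLoop_skip (v : String) (vs : List String) (i : Nat)
    (d : PySem.Dict String (Option String)) (k : String) (hk : keyOf v = some k)
    (hi : i < pvVars.length) (hne : pvVars[i] ≠ k) :
    bLoop (v :: vs) i d = bLoop (v :: vs) (i + 1) d := by
  have ha : advanceB k i = advanceB k (i + 1) := by
    conv_lhs => unfold advanceB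
    simp [hi, hne]
  conv_lhs => unfold bLoop
  conv_rhs => unfold bLoop
  simp only [hk, ha]

-- inserting a fresh key into a literal dict appends
theorem insert_mk_fresh (pre : List (String × Option String)) (w : String)
    (x : Option String) (hw : ∀ p ∈ pre, p.1 ≠ w) :
    (PySem.Dict.mk pre).insert w x = PySem.Dict.mk (pre ++ [(w, x)]) := by
  have hc : (PySem.Dict.mk pre).contains w = false := by
    rw [PySem.Dict.contains_mk]
    simp only [List.any_eq_false]
    intro p hp
    simpa using hw p hp
  apply PySem.Dict.ext
  rw [PySem.Dict.items_insert_of_not_contains _ _ hc]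

theorem pvPad_cons (i : Nat) (hi : i < pvVars.length) :
    pvPad i = (pvVars[i], none) :: pvPad (i + 1) := by
  unfold pvPad
  rw [← List.getElem_cons_drop hi, List.map_cons]

theorem pvVars_head_notin_tail (i : Nat) (hi : i < pvVars.length) :
    ∀ w ∈ pvVars.drop (i + 1), w ≠ pvVars[i] := by
  have hnd : (pvVars.drop i).Nodup := (List.drop_sublist i pvVars).nodup pvVars_nodup
  rw [← List.getElem_cons_drop hi] at hnd
  intro w hw heq
  exact (List.nodup_cons.mp hnd).1 (heq ▸ hw)

-- overwriting the first still-None field of pre ++ pad i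
theorem insert_mk_pad (pre : List (String × Option String)) (i : Nat)
    (hi : i < pvVars.length) (x : Option String)
    (hdisj : ∀ p ∈ pre, p.1 ≠ pvVars[i]) :
    (PySem.Dict.mk (pre ++ pvPad i)).insert pvVars[i] x
      = PySem.Dict.mk ((pre ++ [(pvVars[i], x)]) ++ pvPad (i + 1)) := by
  have hc : (PySem.Dict.mk (pre ++ pvPad i)).contains pvVars[i] = true := by
    rw [PySem.Dict.contains_mk]
    refine List.any_eq_true.mpr ⟨(pvVars[i], none), ?_, by simp⟩
    rw [pvPad_cons i hi]
    simp
  apply PySem.Dict.ext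
  rw [PySem.Dict.items_insert_of_contains _ _ hc]
  show List.map _ (pre ++ pvPad i) = _
  rw [pvPad_cons i hi, List.map_append, List.map_cons]
  have h1 : List.map (fun p => if (p.1 == pvVars[i]) = true then (pvVars[i], x) else p) pre
      = pre := by
    rw [List.map_congr_left (g := id) ?_, List.map_id]
    intro p hp
    simp [hdisj p hp]
  have h2 : List.map (fun p => if (p.1 == pvVars[i]) = true then (pvVars[i], x) else p)
      (pvPad (i + 1)) = pvPad (i + 1) := by
    rw [List.map_congr_left (g := id) ?_, List.map_id]
    intro p hp
    have hw : p.1 ∈ pvVars.drop (i + 1) := by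
      unfold pvPad at hp
      obtain ⟨w, hwm, rfl⟩ := List.mem_map.mp hp
      exact hwm
    simp [pvVars_head_notin_tail i hi p.1 hw]
  rw [h1, h2]
  simp

-- B's while-loop stops immediately at a matching field
theorem advanceB_here (k : String) (i : Nat) (hi : i < pvVars.length)
    (heq : pvVars[i] = k) : advanceB k i = i := by
  unfold advanceB
  simp [hi, heq]

-- the core simulation: A's remaining fields-loop from field i, value cursor j, agrees with
-- B's remaining values-loop from field i
theorem main_sim (values : List String) : ∀ (n i j : Nat) (s : Int)
    (pre : List (String × Option String)), i + n = pvVars.length →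
    (∀ w ∈ pvVars.drop i, ∀ p ∈ pre, p.1 ≠ w) →
    ((PySem.List.enumerate (pvVars.drop i) s).foldl (pvAStep values) (PySem.Dict.mk pre, j)).1
      = bLoop (values.drop j) i (PySem.Dict.mk (pre ++ pvPad i)) := by
  intro n
  induction n with
  | zero =>
    intro i j s pre hin hdisj
    have hlen : pvVars.length ≤ i := by omega
    rw [List.drop_eq_nil_of_le hlen, PySem.List.enumerate_nil, List.foldl_nil,
      bLoop_ge _ _ _ hlen]
    unfold pvPad
    rw [List.drop_eq_nil_of_le hlen]
    simp
  | succ n ih =>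
    intro i j s pre hin hdisj
    have hi : i < pvVars.length := by simp only [pvVars] at hin ⊢; omega
    have hdrop : pvVars.drop i = pvVars[i] :: pvVars.drop (i + 1) :=
      (List.getElem_cons_drop hi).symm
    have hvar : (pvVars[i] : String) ≠ "" := pvVars_ne_empty _ (List.getElem_mem hi)
    have hdisj' : ∀ p ∈ pre, p.1 ≠ pvVars[i] := by
      intro p hp
      exact fun h => hdisj pvVars[i] (by rw [hdrop]; exact List.mem_cons_self ..) p hp h
    -- the disjointness hypothesis for one more inserted pair
    have hdisjX : ∀ x : Option String, ∀ w ∈ pvVars.drop (i + 1),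
        ∀ p ∈ pre ++ [(pvVars[i], x)], p.1 ≠ w := by
      intro x w hw p hp
      rcases List.mem_append.mp hp with hp | hp
      · exact hdisj w (by rw [hdrop]; exact List.mem_cons_of_mem _ hw) p hp
      · simp only [List.mem_singleton] at hp
        subst hp
        exact fun h => pvVars_head_notin_tail i hi w hw (h.symm)
    rw [hdrop, PySem.List.enumerate_cons, List.foldl_cons]
    by_cases hj : j < values.length
    · have hvcons : values.drop j = values[j] :: values.drop (j + 1) :=
        (List.getElem_cons_drop hj).symm
      cases hk : keyOf values[j] with
      | none =>
        -- unkeyed value: both sides consume it at field i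
        have hstep : pvAStep values (PySem.Dict.mk pre, j) (s, pvVars[i])
            = ((PySem.Dict.mk pre).insert pvVars[i] (some values[j]), j + 1) := by
          have hp : pHelper values[j] (some pvVars[i]) = some values[j] := by
            rw [pHelper_eq _ _ hvar, hk]
          unfold pvAStep
          simp [hj, hp]
        rw [hstep, insert_mk_fresh _ _ _ hdisj']
        rw [ih (i + 1) (j + 1) (s + 1) _ (by omega) (hdisjX (some values[j]))]
        rw [hvcons]
        conv_rhs => unfold bLoop
        simp only [hk, hi, dif_pos]
        rw [insert_mk_pad _ _ hi _ hdisj']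
      | some k =>
        by_cases hkv : pvVars[i] = k
        · -- keyed value matching field i: both sides consume it
          have hstep : pvAStep values (PySem.Dict.mk pre, j) (s, pvVars[i])
              = ((PySem.Dict.mk pre).insert pvVars[i] (some values[j]), j + 1) := by
            have hp : pHelper values[j] (some pvVars[i]) = some values[j] := by
              rw [pHelper_eq _ _ hvar, hk]
              simp [hkv]
            unfold pvAStep
            simp [hj, hp]
          rw [hstep, insert_mk_fresh _ _ _ hdisj']
          rw [ih (i + 1) (j + 1) (s + 1) _ (by omega) (hdisjX (some values[j]))]
          rw [hvcons]
          conv_rhs => unfold bLoop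
          simp only [hk, advanceB_here k i hi hkv, hi, dif_pos]
          rw [insert_mk_pad _ _ hi _ hdisj']
        · -- keyed value not matching field i: A writes None, B advances the index
          have hstep : pvAStep values (PySem.Dict.mk pre, j) (s, pvVars[i])
              = ((PySem.Dict.mk pre).insert pvVars[i] none, j) := by
            have hp : pHelper values[j] (some pvVars[i]) = none := by
              rw [pHelper_eq _ _ hvar, hk]
              simp [hkv]
            unfold pvAStep
            simp [hj, hp]
          rw [hstep, insert_mk_fresh _ _ _ hdisj']
          rw [ih (i + 1) j (s + 1) _ (by omega) (hdisjX none)]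
          have hrepad : (pre ++ [(pvVars[i], (none : Option String))]) ++ pvPad (i + 1)
              = pre ++ pvPad i := by
            rw [pvPad_cons i hi, List.append_assoc]
            rfl
          rw [hrepad, hvcons, ← bLoop_skip _ _ _ _ k hk hi hkv]
    · have hnil : values.drop j = [] := List.drop_eq_nil_of_le (by omega)
      have hstep : pvAStep values (PySem.Dict.mk pre, j) (s, pvVars[i])
          = ((PySem.Dict.mk pre).insert pvVars[i] none, j) := by
        unfold pvAStep
        simp [hj]
      rw [hstep, insert_mk_fresh _ _ _ hdisj']
      rw [ih (i + 1) j (s + 1) _ (by omega) (hdisjX none)]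
      have hrepad : (pre ++ [(pvVars[i], (none : Option String))]) ++ pvPad (i + 1)
          = pre ++ pvPad i := by
        rw [pvPad_cons i hi, List.append_assoc]
        rfl
      rw [hrepad, hnil]
      rfl

theorem aligns_eq_all (values : List String) : aligns_py values = aligns_py_alt values := by
  have hinit : pvVars.foldl (fun d var => d.insert var none) PySem.Dict.empty
      = PySem.Dict.mk (pvPad 0) := by
    apply PySem.Dict.ext
    have h := PySem.Dict.items_foldl_insert_fresh pvVars (fun a => a)
      (fun _ => (none : Option String)) PySem.Dict.empty
      (fun a _ => PySem.Dict.contains_empty a) (by simpa using pvVars_nodup)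
    simpa [pvPad] using h
  have h := main_sim values pvVars.length 0 0 0 [] (by simp) (by simp)
  unfold aligns_py aligns_py_alt
  rw [hinit,
    show (PySem.Dict.empty : PySem.Dict String (Option String)) = PySem.Dict.mk [] from rfl]
  rw [List.drop_zero] at h
  simp only [List.drop_zero, List.nil_append] at h
  rw [h]

-- ===== VERDICT (by name: the statement is the Claim_ definition above) =====
theorem aligns_py_spec : Claim_equal_aligns_py := by
  intro values _ _
  unfold Spec_aligns_py
  exact aligns_eq_all values
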